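-- pv_equiv track=rewrite | github.com/grafuso/firstrepo | AutoSync.py | getUploadFiles
-- ===== SOURCE A (Python) =====
-- def getS3ObjectMd5(fileName,respJson):
-- 	for obj in respJson.get('Contents', []):
-- 		if obj['Key'] == fileName:
-- 			return obj['ETag']
-- 	return ''
--
-- def getUploadFiles(objList,md5List,lclFiles):
-- 	listOfFiles = {}
-- 	for key, value in md5List.items():
-- 		if (value != getS3ObjectMd5(key,objList).strip("\"")):
-- 			for local, dest in lclFiles.items():
-- 				if dest == key:
-- 					listOfFiles[local] = key
-- 	return listOfFiles
-- ===== SOURCE B (Python) =====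
-- def getUploadFiles(objList, md5List, lclFiles):
-- 	# One pass over S3 objects to build a keep-first Key->ETag index,
-- 	# one pass over lclFiles to group locals by destination,
-- 	# then a single pass over md5List: no nested rescans.
-- 	etag = {}
-- 	for obj in objList.get('Contents', []):
-- 		if obj['Key'] not in etag:
-- 			etag[obj['Key']] = obj['ETag']
-- 	byDest = {}
-- 	for local, dest in lclFiles.items():
-- 		byDest.setdefault(dest, []).append(local)
-- 	listOfFiles = {}
-- 	for key, value in md5List.items():
-- 		if value != etag.get(key, '').strip("\""):
-- 			for local in byDest.get(key, []):
-- 				listOfFiles[local] = key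
-- 	return listOfFiles
-- ===== Notes on version B (the rewrite author's own statement) =====
-- stated objective: faster
-- what changed: A rescans the whole S3 listing (getS3ObjectMd5) and the whole lclFiles dict for every md5List entry; B builds a keep-first Key->ETag index and a dest->locals grouping in one pass each and then makes a single pass over md5List with O(1) lookups.
-- outside the precondition, e.g. on getUploadFiles({'Contents': [{}]}, {}, {}): A returns {}, B raises KeyError; on getUploadFiles({'Contents': [{'Key': 'a', 'ETag': 'e'}, {}]}, {'a': 'x'}, {}): A returns {}, B raises KeyError
import Mathlib
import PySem

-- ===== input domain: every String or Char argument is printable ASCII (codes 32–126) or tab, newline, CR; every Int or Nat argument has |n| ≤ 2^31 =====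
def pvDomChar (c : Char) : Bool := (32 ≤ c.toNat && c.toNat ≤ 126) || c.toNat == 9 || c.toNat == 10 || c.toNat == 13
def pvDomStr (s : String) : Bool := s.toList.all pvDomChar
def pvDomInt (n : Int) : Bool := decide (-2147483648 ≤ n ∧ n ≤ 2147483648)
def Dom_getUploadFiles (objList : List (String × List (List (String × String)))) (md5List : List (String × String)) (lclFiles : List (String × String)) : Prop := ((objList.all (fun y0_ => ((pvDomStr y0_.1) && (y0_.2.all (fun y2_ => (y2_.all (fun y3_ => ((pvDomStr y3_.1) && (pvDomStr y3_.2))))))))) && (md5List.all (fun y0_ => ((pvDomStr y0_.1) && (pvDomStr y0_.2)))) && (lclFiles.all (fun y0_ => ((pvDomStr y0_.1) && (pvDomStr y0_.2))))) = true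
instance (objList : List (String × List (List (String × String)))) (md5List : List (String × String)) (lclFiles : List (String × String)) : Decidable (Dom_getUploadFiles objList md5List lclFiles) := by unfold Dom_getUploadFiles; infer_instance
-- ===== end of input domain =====

-- B replaces A's per-md5-key rescans of the S3 listing and of lclFiles by three sequential
-- passes (a keep-first ETag index, a dest→locals grouping, then one pass over md5List);
-- equivalence of the RETURN value is proved on Pre_ (every S3 object carries 'Key' and 'ETag').

-- ===== PORT A =====
-- getS3ObjectMd5: scan of respJson.get('Contents', []); obj['Key'] / obj['ETag'] are ported
-- with default "" — exact under Pre_, which guarantees both keys are present.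
def pvScanA (fileName : String) : List (List (String × String)) → String
  | [] => ""
  | obj :: rest =>
      if (PySem.Dict.mk obj).getD "Key" "" == fileName then (PySem.Dict.mk obj).getD "ETag" ""
      else pvScanA fileName rest

def getS3ObjectMd5 (fileName : String) (respJson : List (String × List (List (String × String)))) : String :=
  pvScanA fileName ((PySem.Dict.mk respJson).getD "Contents" [])

def getUploadFiles (objList : List (String × List (List (String × String)))) (md5List : List (String × String)) (lclFiles : List (String × String)) : List (String × String) :=
  (md5List.foldl (fun acc kv =>
      if kv.2 ≠ PySem.Str.stripChars (getS3ObjectMd5 kv.1 objList) "\"" then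
        lclFiles.foldl (fun a ld => if ld.2 == kv.1 then a.insert ld.1 kv.1 else a) acc
      else acc) PySem.Dict.empty).items

-- ===== PORT B =====
-- keep-first ETag index: etag[k] = ETag of the FIRST object with Key k (obj['Key']/obj['ETag']
-- again ported with default "", exact under Pre_)
def pvEtagIndexB (contents : List (List (String × String))) : PySem.Dict String String :=
  contents.foldl (fun d obj =>
      if d.contains ((PySem.Dict.mk obj).getD "Key" "") then d
      else d.insert ((PySem.Dict.mk obj).getD "Key" "") ((PySem.Dict.mk obj).getD "ETag" "")) PySem.Dict.empty

-- byDest.setdefault(dest, []).append(local)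
def pvByDestB (lclFiles : List (String × String)) : PySem.Dict String (List String) :=
  lclFiles.foldl (fun d ld => d.modify ld.2 [] (· ++ [ld.1])) PySem.Dict.empty

def getUploadFiles_alt (objList : List (String × List (List (String × String)))) (md5List : List (String × String)) (lclFiles : List (String × String)) : List (String × String) :=
  let etag := pvEtagIndexB ((PySem.Dict.mk objList).getD "Contents" [])
  let byDest := pvByDestB lclFiles
  (md5List.foldl (fun acc kv =>
      if kv.2 ≠ PySem.Str.stripChars (etag.getD kv.1 "") "\"" then
        (byDest.getD kv.1 []).foldl (fun a loc => a.insert loc kv.1) acc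
      else acc) PySem.Dict.empty).items

-- ===== PRECONDITION & SPEC =====
-- Pre_ excludes inputs where some object of objList['Contents'] lacks a 'Key' or 'ETag' entry:
-- there A raises KeyError whenever its scan reaches the malformed object (and B's index build
-- always raises); on the few such inputs where A still returns because its scan stops early
-- (empty md5List, or a match before the malformed object) B raises KeyError — see claim cites.
def Pre_getUploadFiles (objList : List (String × List (List (String × String)))) (md5List : List (String × String)) (lclFiles : List (String × String)) : Prop :=
  ∀ obj ∈ (PySem.Dict.mk objList).getD "Contents" [],
    (PySem.Dict.mk obj).contains "Key" = true ∧ (PySem.Dict.mk obj).contains "ETag" = true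
instance (objList : List (String × List (List (String × String)))) (md5List : List (String × String)) (lclFiles : List (String × String)) : Decidable (Pre_getUploadFiles objList md5List lclFiles) := by unfold Pre_getUploadFiles; infer_instance

def pvWitness_getUploadFiles : (List (String × List (List (String × String)))) × (List (String × String)) × (List (String × String)) :=
  ([("Contents", [[("Key", "a.txt"), ("ETag", "\"d41d\"")]])], [("a.txt", "beef")], [("/tmp/a.txt", "a.txt")])

def Spec_getUploadFiles (objList : List (String × List (List (String × String)))) (md5List : List (String × String)) (lclFiles : List (String × String)) (out : List (String × String)) : Prop := out = getUploadFiles_alt objList md5List lclFiles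
instance (objList : List (String × List (List (String × String)))) (md5List : List (String × String)) (lclFiles : List (String × String)) (out : List (String × String)) : Decidable (Spec_getUploadFiles objList md5List lclFiles out) := by unfold Spec_getUploadFiles; infer_instance

-- ===== CLAIM (what is proved, stated in full; the proofs are below) =====
def Claim_equal_getUploadFiles : Prop := ∀ (objList : List (String × List (List (String × String)))) (md5List : List (String × String)) (lclFiles : List (String × String)), Dom_getUploadFiles objList md5List lclFiles → Pre_getUploadFiles objList md5List lclFiles → Spec_getUploadFiles objList md5List lclFiles (getUploadFiles objList md5List lclFiles)

-- ===== LEMMAS AND PROOFS =====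

-- the keep-first index looks up exactly what A's linear scan returns
theorem pvEtag_fold (contents : List (List (String × String))) (d : PySem.Dict String String) (f : String) :
    (contents.foldl (fun d obj =>
        if d.contains ((PySem.Dict.mk obj).getD "Key" "") then d
        else d.insert ((PySem.Dict.mk obj).getD "Key" "") ((PySem.Dict.mk obj).getD "ETag" "")) d).getD f ""
      = match d.get? f with
        | some v => v
        | none => pvScanA f contents := by
  induction contents generalizing d with
  | nil =>
      cases h : d.get? f with
      | none => simp [PySem.Dict.getD_eq_get?_getD, h, pvScanA]
      | some v => simp [PySem.Dict.getD_eq_get?_getD, h]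
  | cons obj rest ih =>
      simp only [List.foldl_cons]
      by_cases hc : d.contains ((PySem.Dict.mk obj).getD "Key" "") = true
      · rw [if_pos hc, ih]
        cases h : d.get? f with
        | some v => rfl
        | none =>
            have hne : ((PySem.Dict.mk obj).getD "Key" "" == f) = false := by
              by_contra hne
              have : (PySem.Dict.mk obj).getD "Key" "" = f := by
                simpa using eq_of_beq (by simpa using Bool.of_not_eq_false hne)
              rw [this] at hc
              rw [PySem.Dict.contains_eq_isSome_get?, h] at hc
              simp at hc
            simp [pvScanA, hne]
      · rw [if_neg hc, ih]
        by_cases hf : f = (PySem.Dict.mk obj).getD "Key" ""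
        · have hnone : d.get? f = none := by
            rw [PySem.Dict.contains_eq_isSome_get?, ← hf] at hc
            cases h : d.get? f with
            | none => rfl
            | some v => rw [h] at hc; simp at hc
          rw [PySem.Dict.get?_insert, if_pos hf, hnone]
          simp [pvScanA, hf]
        · rw [PySem.Dict.get?_insert, if_neg hf]
          cases h : d.get? f with
          | some v => rfl
          | none =>
              have : ((PySem.Dict.mk obj).getD "Key" "" == f) = false := by
                simp
                exact fun h' => hf h'.symm
              simp [pvScanA, this]

theorem pvEtag_getD (objList : List (String × List (List (String × String)))) (f : String) :
    (pvEtagIndexB ((PySem.Dict.mk objList).getD "Contents" [])).getD f "" = getS3ObjectMd5 f objList := by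
  unfold pvEtagIndexB getS3ObjectMd5
  rw [pvEtag_fold]
  simp [PySem.Dict.get?_empty]

-- the grouping dict holds, per destination, exactly the matching locals in lclFiles order
theorem pvByDest_getD (lclFiles : List (String × String)) (k : String) :
    (pvByDestB lclFiles).getD k [] = (lclFiles.filter (fun ld => ld.2 == k)).map (·.1) := by
  unfold pvByDestB
  have h := PySem.Dict.getD_foldl_modify_append (l := lclFiles.map Prod.swap)
    (d := (PySem.Dict.empty : PySem.Dict String (List String))) (c := k)
  rw [List.foldl_map] at h
  simp only [Prod.swap] at h
  rw [h]
  simp [List.filter_map, List.map_map, Function.comp_def, PySem.Dict.getD_empty]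

-- A's inner scan of lclFiles = B's fold over the pre-grouped locals
theorem pvInner (k : String) (lclFiles : List (String × String)) (a : PySem.Dict String String) :
    lclFiles.foldl (fun a ld => if ld.2 == k then a.insert ld.1 k else a) a
      = ((lclFiles.filter (fun ld => ld.2 == k)).map (·.1)).foldl (fun a loc => a.insert loc k) a := by
  induction lclFiles generalizing a with
  | nil => rfl
  | cons ld rest ih =>
      by_cases h : (ld.2 == k) = true
      · rw [List.foldl_cons, if_pos h, List.filter_cons, if_pos h, List.map_cons, List.foldl_cons]
        exact ih _
      · simp only [List.foldl_cons, List.filter_cons]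
        rw [if_neg (by simp_all), ih]
        simp [h]

-- ===== VERDICT (by name: the statement is the Claim_ definition above) =====
theorem getUploadFiles_spec : Claim_equal_getUploadFiles := by
  intro objList md5List lclFiles _ _
  show getUploadFiles objList md5List lclFiles = getUploadFiles_alt objList md5List lclFiles
  have halt : getUploadFiles_alt objList md5List lclFiles =
      (md5List.foldl (fun acc kv =>
          if kv.2 ≠ PySem.Str.stripChars ((pvEtagIndexB ((PySem.Dict.mk objList).getD "Contents" [])).getD kv.1 "") "\"" then
            ((pvByDestB lclFiles).getD kv.1 []).foldl (fun a loc => a.insert loc kv.1) acc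
          else acc) PySem.Dict.empty).items := rfl
  rw [halt]
  unfold getUploadFiles
  refine congrArg PySem.Dict.items ?_
  have hfun : (fun (acc : PySem.Dict String String) (kv : String × String) =>
      if kv.2 ≠ PySem.Str.stripChars (getS3ObjectMd5 kv.1 objList) "\"" then
        lclFiles.foldl (fun a ld => if ld.2 == kv.1 then a.insert ld.1 kv.1 else a) acc
      else acc)
      = (fun (acc : PySem.Dict String String) (kv : String × String) =>
      if kv.2 ≠ PySem.Str.stripChars ((pvEtagIndexB ((PySem.Dict.mk objList).getD "Contents" [])).getD kv.1 "") "\"" then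
        ((pvByDestB lclFiles).getD kv.1 []).foldl (fun a loc => a.insert loc kv.1) acc
      else acc) := by
    funext acc kv
    rw [pvEtag_getD, pvByDest_getD, pvInner]
  rw [hfun]
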